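-- pv_equiv track=rewrite | github.com/santeri-suo/terminalsolver | functions.py | assemble_database
-- ===== SOURCE A (Python) =====
-- def hamming(s1, s2):
--     # from https://pythonadventures.wordpress.com/2010/10/19/hamming-distance/
--     assert len(s1) == len(s2)
--     return sum(ch1 == ch2 for ch1, ch2 in zip(s1, s2))
--
-- def assemble_database(passwords):
--     """
--     :param passwords: a list of passwords.
--     :return: for example: {'password1': {'password2': 0, 'password3': 3}, 'password2' : {...}, 'password3': {...}}
--     basically a dict that contains reversed Hamming distances for everything.
--     """
--
--     database = {}
--
--     for entry in passwords:
--         database[entry] = {}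
--
--     for key in database.keys():
--         for entry in passwords:
--             # Don't add a password to it's own list.
--             if entry != key:
--                 database[key][entry] = hamming(key, entry)
--
--     return database
-- ===== SOURCE B (Python) =====
-- def hamming(s1, s2):
--     assert len(s1) == len(s2)
--     return sum(ch1 == ch2 for ch1, ch2 in zip(s1, s2))
--
-- def assemble_database(passwords):
--     """Fill the table from unordered pairs only: one hamming call per pair,
--     mirrored into both rows, looping over unique passwords once."""
--     uniques = list(dict.fromkeys(passwords))
--     database = {p: {} for p in uniques}
--     for i, a in enumerate(uniques):
--         for b in uniques[i + 1:]:
--             d = hamming(a, b)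
--             database[a][b] = d
--             database[b][a] = d
--     return database
-- ===== Notes on version B (the rewrite author's own statement) =====
-- stated objective: alternative
-- what changed: B deduplicates the passwords once and fills the table from unordered pairs only, computing each Hamming similarity once and mirroring it into both rows, instead of A's full ordered nested scan of the raw list for every key.
import Mathlib
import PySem

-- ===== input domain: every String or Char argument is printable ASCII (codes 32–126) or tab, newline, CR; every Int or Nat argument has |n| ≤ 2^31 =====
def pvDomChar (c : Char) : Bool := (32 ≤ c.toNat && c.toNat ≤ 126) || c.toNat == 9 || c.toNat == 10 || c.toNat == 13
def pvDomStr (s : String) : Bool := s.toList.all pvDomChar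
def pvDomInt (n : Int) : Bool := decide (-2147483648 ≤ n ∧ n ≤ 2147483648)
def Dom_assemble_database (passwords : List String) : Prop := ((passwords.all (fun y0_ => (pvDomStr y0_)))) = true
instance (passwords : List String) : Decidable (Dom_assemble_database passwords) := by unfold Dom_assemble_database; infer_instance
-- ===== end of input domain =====

-- B fills the Hamming table from unordered pairs of the unique passwords only (one hamming
-- call per pair, mirrored into both rows) instead of A's full ordered nested scan over the
-- raw list; objective: alternative decomposition (same result, table filled from the upper triangle).

-- ===== PORT A =====
-- helper 'hamming' (identical in both Python sources): sum(ch1 == ch2 for ch1, ch2 in zip(s1, s2)).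
-- The Python assert len(s1) == len(s2) raises AssertionError on unequal lengths; those inputs are
-- excluded by Pre_assemble_database below.
def hamming (s1 s2 : String) : Int :=
  ((s1.toList.zip s2.toList).map (fun p => if p.1 == p.2 then (1 : Int) else 0)).sum

def assemble_database (passwords : List String) : List (String × List (String × Int)) :=
  let database : PySem.Dict String (PySem.Dict String Int) :=
    passwords.foldl (fun d entry => d.insert entry PySem.Dict.empty) PySem.Dict.empty
  let database :=
    database.keys.foldl (fun d key =>
      passwords.foldl (fun d entry =>
        if entry ≠ key then
          d.modify key PySem.Dict.empty (fun inner => inner.insert entry (hamming key entry))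
        else d) d) database
  database.items.map (fun p => (p.1, p.2.items))

-- ===== PORT B =====
-- 'for i, a in enumerate(uniques): for b in uniques[i+1:]: …' — structural recursion: at each
-- head a, the inner loop runs over the tail (= uniques[i+1:]).
def pvFill (d : PySem.Dict String (PySem.Dict String Int)) :
    List String → PySem.Dict String (PySem.Dict String Int)
  | [] => d
  | a :: rest =>
      pvFill (rest.foldl (fun d b =>
        let v := hamming a b
        (d.modify a PySem.Dict.empty (fun inner => inner.insert b v)).modify b
          PySem.Dict.empty (fun inner => inner.insert a v)) d) rest

def assemble_database_alt (passwords : List String) : List (String × List (String × Int)) :=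
  let uniques := PySem.List.dedup passwords
  let database : PySem.Dict String (PySem.Dict String Int) :=
    uniques.foldl (fun d p => d.insert p PySem.Dict.empty) PySem.Dict.empty
  let database := pvFill database uniques
  database.items.map (fun p => (p.1, p.2.items))

-- ===== PRECONDITION & SPEC =====
-- Pre_ excludes exactly the inputs where Python A raises AssertionError: two distinct
-- passwords of different lengths (every distinct pair is compared by hamming).
def Pre_assemble_database (passwords : List String) : Prop :=
  ∀ a ∈ passwords, ∀ b ∈ passwords, a ≠ b → PySem.Str.len a = PySem.Str.len b
instance (passwords : List String) : Decidable (Pre_assemble_database passwords) := by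
  unfold Pre_assemble_database; infer_instance
def pvWitness_assemble_database : List String := ["ab", "cd", "ab"]
def Spec_assemble_database (passwords : List String) (out : List (String × List (String × Int))) : Prop := out = assemble_database_alt passwords
instance (passwords : List String) (out : List (String × List (String × Int))) : Decidable (Spec_assemble_database passwords out) := by unfold Spec_assemble_database; infer_instance

-- ===== CLAIM (what is proved, stated in full; the proofs are below) =====
def Claim_equal_assemble_database : Prop := ∀ (passwords : List String), Dom_assemble_database passwords → Pre_assemble_database passwords → Spec_assemble_database passwords (assemble_database passwords)

-- ===== LEMMAS AND PROOFS =====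

-- hamming is symmetric (the zip truncates symmetrically, == is symmetric)
theorem pv_zipsum_comm : ∀ (l1 l2 : List Char),
    ((l1.zip l2).map (fun p => if p.1 == p.2 then (1 : Int) else 0)).sum
      = ((l2.zip l1).map (fun p => if p.1 == p.2 then (1 : Int) else 0)).sum := by
  intro l1
  induction l1 with
  | nil => intro l2; cases l2 <;> simp [List.zip]
  | cons x xs ih =>
    intro l2
    cases l2 with
    | nil => simp [List.zip]
    | cons y ys =>
      simp only [List.zip_cons_cons, List.map_cons, List.sum_cons, ih ys]
      have : (x == y) = (y == x) := by
        by_cases hxy : x = y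
        · simp [hxy]
        · simp [hxy, Ne.symm hxy]
      rw [this]

theorem hamming_comm (s t : String) : hamming s t = hamming t s := by
  unfold hamming; exact pv_zipsum_comm s.toList t.toList

-- folding insert with a value depending only on the key, over any list, builds the dict of
-- the deduplicated keys (overwrites rewrite the same value in place)
theorem pv_foldl_insert_f {ν : Type} (f : String → ν) :
    ∀ (l acc : List String), acc.Nodup →
      l.foldl (fun d e => d.insert e (f e)) (PySem.Dict.mk (acc.map (fun e => (e, f e))))
        = PySem.Dict.mk ((PySem.Set.update acc l).map (fun e => (e, f e))) := by
  intro l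
  induction l with
  | nil => intro acc h; simp [PySem.Set.update_nil]
  | cons e l ih =>
    intro acc h
    have hstep : (PySem.Dict.mk (acc.map (fun e => (e, f e)))).insert e (f e)
        = PySem.Dict.mk ((PySem.Set.add acc e).map (fun e => (e, f e))) := by
      by_cases hm : e ∈ acc
      · apply PySem.Dict.ext
        rw [PySem.Dict.items_insert_of_contains _ _ (by
          rw [PySem.Dict.contains_iff_mem_keys]; simp [PySem.Dict.keys_mk, hm])]
        rw [PySem.Set.add_of_mem hm]
        dsimp only
        rw [List.map_map]
        apply List.map_congr_left
        intro a _
        by_cases hae : a = e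
        · subst hae; simp
        · simp [hae]
      · apply PySem.Dict.ext
        rw [PySem.Dict.items_insert_of_not_contains _ _ (by
          rw [← Bool.not_eq_true, PySem.Dict.contains_iff_mem_keys]
          simp [PySem.Dict.keys_mk, hm])]
        rw [PySem.Set.add_of_not_mem hm]
        dsimp only
        rw [List.map_append]
        rfl
    rw [List.foldl_cons, hstep, PySem.Set.update_cons, ih]
    by_cases hm : e ∈ acc
    · rw [PySem.Set.add_of_mem hm]; exact h
    · rw [PySem.Set.add_of_not_mem hm]
      simp only [List.nodup_append, List.nodup_singleton, true_and]
      refine ⟨h, ?_⟩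
      intro a ha b hb
      simp only [List.mem_singleton] at hb
      subst hb
      intro hab
      exact hm (hab ▸ ha)

-- dedup commutes with filter
theorem pv_dedup_filter (p : String → Bool) :
    ∀ (l : List String), PySem.List.dedup (l.filter p) = (PySem.List.dedup l).filter p := by
  intro l
  simp only [PySem.List.dedup_eq_ofList]
  induction l with
  | nil => simp
  | cons x xs ih =>
    by_cases hx : p x = true
    · rw [List.filter_cons_of_pos hx, PySem.Set.ofList_cons, PySem.Set.ofList_cons,
        List.filter_cons_of_pos hx, ih]
      unfold PySem.Set.discard
      rw [List.filter_filter, List.filter_filter]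
      congr 1
      apply List.filter_congr
      intro a _
      rw [Bool.and_comm]
    · rw [List.filter_cons_of_neg hx, PySem.Set.ofList_cons, List.filter_cons_of_neg hx, ih]
      unfold PySem.Set.discard
      rw [List.filter_filter]
      apply List.filter_congr
      intro a ha
      by_cases hax : a = x
      · subst hax; simp [hx]
      · simp [hax]

-- the row a key accumulates in A's inner loop
def pvInnerRow (passwords : List String) (key : String) (x : PySem.Dict String Int) :
    PySem.Dict String Int :=
  passwords.foldl (fun inn e => if e ≠ key then inn.insert e (hamming key e) else inn) x

-- the finished row of a key, as an items list
def pvRowItems (passwords : List String) (k : String) : List (String × Int) :=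
  ((PySem.List.dedup passwords).filter (fun e => e ≠ k)).map (fun e => (e, hamming k e))

-- A's inner loop: keys unchanged, only the row of `key` is touched, and it becomes pvInnerRow
theorem pv_innerA (key : String) :
    ∀ (l : List String) (d : PySem.Dict String (PySem.Dict String Int)),
      d.contains key = true →
      (l.foldl (fun d entry =>
          if entry ≠ key then
            d.modify key PySem.Dict.empty (fun inner => inner.insert entry (hamming key entry))
          else d) d).keys = d.keys ∧
      ∀ j, (l.foldl (fun d entry =>
          if entry ≠ key then
            d.modify key PySem.Dict.empty (fun inner => inner.insert entry (hamming key entry))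
          else d) d).getD j PySem.Dict.empty
        = if j = key then pvInnerRow l key (d.getD key PySem.Dict.empty)
          else d.getD j PySem.Dict.empty := by
  intro l
  induction l with
  | nil =>
    intro d hc
    refine ⟨rfl, fun j => ?_⟩
    by_cases hj : j = key <;> simp [hj, pvInnerRow]
  | cons entry l ih =>
    intro d hc
    rw [List.foldl_cons]
    by_cases he : entry ≠ key
    · rw [if_pos he]
      set d' := d.modify key PySem.Dict.empty
        (fun inner => inner.insert entry (hamming key entry)) with hd'
      have hkeys' : d'.keys = d.keys := by
        rw [hd', PySem.Dict.keys_modify, PySem.Dict.keys_insert_of_contains _ _ hc]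
      have hc' : d'.contains key = true := by
        rw [PySem.Dict.contains_iff_mem_keys, hkeys', ← PySem.Dict.contains_iff_mem_keys]
        exact hc
      obtain ⟨hk, hg⟩ := ih d' hc'
      refine ⟨by rw [hk, hkeys'], fun j => ?_⟩
      rw [hg j]
      by_cases hj : j = key
      · subst hj
        rw [if_pos rfl, if_pos rfl]
        have hdj : d'.getD j PySem.Dict.empty
            = (d.getD j PySem.Dict.empty).insert entry (hamming j entry) := by
          rw [hd', PySem.Dict.getD_modify, if_pos rfl]
        rw [hdj]
        simp [pvInnerRow, he]
      · rw [if_neg hj, if_neg hj, hd', PySem.Dict.getD_modify, if_neg hj]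
    · rw [if_neg he]
      obtain ⟨hk, hg⟩ := ih d hc
      refine ⟨hk, fun j => ?_⟩
      rw [hg j]
      by_cases hj : j = key
      · subst hj
        rw [if_pos rfl, if_pos rfl]
        have heq : entry = j := not_not.1 he
        simp [pvInnerRow, heq]
      · rw [if_neg hj, if_neg hj]

-- A's outer loop over a Nodup key list: each key's row becomes pvInnerRow of its old row
theorem pv_outerA (passwords : List String) :
    ∀ (K : List String) (d : PySem.Dict String (PySem.Dict String Int)),
      K.Nodup → (∀ k ∈ K, d.contains k = true) →
      (K.foldl (fun d key =>
        passwords.foldl (fun d entry =>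
          if entry ≠ key then
            d.modify key PySem.Dict.empty (fun inner => inner.insert entry (hamming key entry))
          else d) d) d).keys = d.keys ∧
      ∀ j, (K.foldl (fun d key =>
        passwords.foldl (fun d entry =>
          if entry ≠ key then
            d.modify key PySem.Dict.empty (fun inner => inner.insert entry (hamming key entry))
          else d) d) d).getD j PySem.Dict.empty
        = if j ∈ K then pvInnerRow passwords j (d.getD j PySem.Dict.empty)
          else d.getD j PySem.Dict.empty := by
  intro K
  induction K with
  | nil =>
    intro d _ _
    exact ⟨rfl, fun j => by simp⟩
  | cons key K ih =>
    intro d hnd hcont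
    rw [List.foldl_cons]
    have hckey : d.contains key = true := hcont key (by simp)
    obtain ⟨hk1, hg1⟩ := pv_innerA key passwords d hckey
    set d' := passwords.foldl (fun d entry =>
      if entry ≠ key then
        d.modify key PySem.Dict.empty (fun inner => inner.insert entry (hamming key entry))
      else d) d with hd'
    have hnotmem : key ∉ K := (List.nodup_cons.1 hnd).1
    have hndK : K.Nodup := (List.nodup_cons.1 hnd).2
    have hcont' : ∀ k ∈ K, d'.contains k = true := by
      intro k hkK
      rw [PySem.Dict.contains_iff_mem_keys, hk1, ← PySem.Dict.contains_iff_mem_keys]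
      exact hcont k (by simp [hkK])
    obtain ⟨hk2, hg2⟩ := ih d' hndK hcont'
    refine ⟨hk2.trans hk1, fun j => ?_⟩
    rw [hg2 j]
    by_cases hjK : j ∈ K
    · rw [if_pos hjK, if_pos (by simp [hjK])]
      have hjk : j ≠ key := fun h => hnotmem (h ▸ hjK)
      rw [hg1 j, if_neg hjk]
    · by_cases hjkey : j = key
      · subst hjkey
        rw [if_neg hjK, if_pos (by simp), hg1 j, if_pos rfl]
      · rw [if_neg hjK, if_neg (by simp [hjK, hjkey]), hg1 j, if_neg hjkey]

-- a finished row, closed form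
theorem pv_row_closed (passwords : List String) (k : String) :
    pvInnerRow passwords k PySem.Dict.empty = PySem.Dict.mk (pvRowItems passwords k) := by
  unfold pvInnerRow pvRowItems
  rw [show (fun (inn : PySem.Dict String Int) (e : String) =>
      if e ≠ k then inn.insert e (hamming k e) else inn)
    = (fun (inn : PySem.Dict String Int) (e : String) =>
      if (fun e => decide (e ≠ k)) e = true then inn.insert e (hamming k e) else inn) from by
      funext inn e; by_cases he : e ≠ k <;> simp [he]]
  rw [← List.foldl_filter]
  have h2 := pv_foldl_insert_f (fun e => hamming k e)
    (passwords.filter (fun e => decide (e ≠ k))) [] (by simp)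
  simp only [List.map_nil] at h2
  rw [show (PySem.Dict.empty : PySem.Dict String Int) = PySem.Dict.mk [] from rfl, h2,
    PySem.Set.update_nil_left, ← PySem.List.dedup_eq_ofList, pv_dedup_filter]

-- the first loop of either implementation: dict of empty rows over the dedup'd keys
theorem pv_db0 (l : List String) :
    l.foldl (fun d e => d.insert e (PySem.Dict.empty : PySem.Dict String Int)) PySem.Dict.empty
      = PySem.Dict.mk ((PySem.List.dedup l).map (fun e => (e, PySem.Dict.empty))) := by
  have := pv_foldl_insert_f (fun _ => (PySem.Dict.empty : PySem.Dict String Int)) l [] (by simp)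
  simpa [PySem.Set.update_nil_left, PySem.List.dedup_eq_ofList] using this

-- B's inner pass for head a over tail L
theorem pv_passB (a : String) :
    ∀ (L : List String) (d : PySem.Dict String (PySem.Dict String Int)),
      a ∉ L → L.Nodup → d.contains a = true → (∀ b ∈ L, d.contains b = true) →
      (L.foldl (fun d b =>
          let v := hamming a b
          (d.modify a PySem.Dict.empty (fun inner => inner.insert b v)).modify b
            PySem.Dict.empty (fun inner => inner.insert a v)) d).keys = d.keys ∧
      (L.foldl (fun d b =>
          let v := hamming a b
          (d.modify a PySem.Dict.empty (fun inner => inner.insert b v)).modify b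
            PySem.Dict.empty (fun inner => inner.insert a v)) d).getD a PySem.Dict.empty
        = L.foldl (fun inn b => inn.insert b (hamming a b)) (d.getD a PySem.Dict.empty) ∧
      (∀ b ∈ L, (L.foldl (fun d b =>
          let v := hamming a b
          (d.modify a PySem.Dict.empty (fun inner => inner.insert b v)).modify b
            PySem.Dict.empty (fun inner => inner.insert a v)) d).getD b PySem.Dict.empty
        = (d.getD b PySem.Dict.empty).insert a (hamming a b)) ∧
      (∀ j, j ≠ a → j ∉ L → (L.foldl (fun d b =>
          let v := hamming a b
          (d.modify a PySem.Dict.empty (fun inner => inner.insert b v)).modify b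
            PySem.Dict.empty (fun inner => inner.insert a v)) d).getD j PySem.Dict.empty
        = d.getD j PySem.Dict.empty) := by
  intro L
  induction L with
  | nil =>
    intro d _ _ _ _
    exact ⟨rfl, rfl, by simp, fun j _ _ => rfl⟩
  | cons b L ih =>
    intro d hna hnd hca hcb
    have hab : a ≠ b := fun h => hna (by simp [h])
    have hnaL : a ∉ L := fun h => hna (by simp [h])
    have hnbL : b ∉ L := (List.nodup_cons.1 hnd).1
    have hndL : L.Nodup := (List.nodup_cons.1 hnd).2
    rw [List.foldl_cons]
    set d' := ((d.modify a PySem.Dict.empty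
        (fun inner => inner.insert b (hamming a b))).modify b
        PySem.Dict.empty (fun inner => inner.insert a (hamming a b))) with hd'
    have hkeys' : d'.keys = d.keys := by
      rw [hd', PySem.Dict.keys_modify, PySem.Dict.keys_insert_of_contains _ _ (by
          rw [PySem.Dict.contains_modify]
          simp only [Bool.or_eq_true, beq_iff_eq]
          exact Or.inr (hcb b (by simp))),
        PySem.Dict.keys_modify, PySem.Dict.keys_insert_of_contains _ _ hca]
    have hcont' : ∀ x, d.contains x = true → d'.contains x = true := by
      intro x hx
      rw [PySem.Dict.contains_iff_mem_keys, hkeys', ← PySem.Dict.contains_iff_mem_keys]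
      exact hx
    have hga' : d'.getD a PySem.Dict.empty
        = (d.getD a PySem.Dict.empty).insert b (hamming a b) := by
      rw [hd', PySem.Dict.getD_modify, if_neg hab, PySem.Dict.getD_modify, if_pos rfl]
    have hgb' : d'.getD b PySem.Dict.empty
        = (d.getD b PySem.Dict.empty).insert a (hamming a b) := by
      rw [hd', PySem.Dict.getD_modify, if_pos rfl, PySem.Dict.getD_modify, if_neg hab.symm]
    have hgo' : ∀ j, j ≠ a → j ≠ b → d'.getD j PySem.Dict.empty = d.getD j PySem.Dict.empty := by
      intro j hja hjb
      rw [hd', PySem.Dict.getD_modify, if_neg hjb, PySem.Dict.getD_modify, if_neg hja]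
    obtain ⟨ihk, ihga, ihgb, ihgo⟩ := ih d' hnaL hndL (hcont' a hca)
      (fun x hx => hcont' x (hcb x (by simp [hx])))
    refine ⟨ihk.trans hkeys', ?_, ?_, ?_⟩
    · rw [ihga, hga', List.foldl_cons]
    · intro x hx
      rcases List.mem_cons.1 hx with hxb | hxL
      · subst hxb
        rw [ihgo x hab.symm hnbL, hgb']
      · rw [ihgb x hxL, hgo' x (fun h => hnaL (h ▸ hxL))
          (fun h => hnbL (h ▸ hxL))]
    · intro j hja hjL
      have hjb : j ≠ b := fun h => hjL (by simp [h])
      rw [ihgo j hja (fun h => hjL (by simp [h])), hgo' j hja hjb]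

-- B's fill: from rows holding the processed prefix P, every row finishes
theorem pv_fill_spec (u : List String) (hu : u.Nodup) :
    ∀ (R P : List String) (d : PySem.Dict String (PySem.Dict String Int)),
      u = P ++ R → d.keys = u →
      (∀ k ∈ P, d.getD k PySem.Dict.empty
        = PySem.Dict.mk ((u.filter (fun e => e ≠ k)).map (fun e => (e, hamming k e)))) →
      (∀ k ∈ R, d.getD k PySem.Dict.empty
        = PySem.Dict.mk (P.map (fun e => (e, hamming k e)))) →
      (pvFill d R).keys = u ∧
      ∀ k ∈ u, (pvFill d R).getD k PySem.Dict.empty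
        = PySem.Dict.mk ((u.filter (fun e => e ≠ k)).map (fun e => (e, hamming k e))) := by
  intro R
  induction R with
  | nil =>
    intro P d hPR hkeys hP _
    rw [List.append_nil] at hPR
    subst hPR
    exact ⟨hkeys, fun k hk => hP k hk⟩
  | cons a R ih =>
    intro P d hPR hkeys hP hR
    have hnd : (P ++ a :: R).Nodup := hPR ▸ hu
    have haP : a ∉ P := by
      intro h
      exact (List.disjoint_of_nodup_append hnd) h (by simp)
    have haR : a ∉ R := by
      have := (List.nodup_append.1 hnd).2.1
      exact (List.nodup_cons.1 this).1
    have hndR : R.Nodup := by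
      have := (List.nodup_append.1 hnd).2.1
      exact (List.nodup_cons.1 this).2
    have hRP : ∀ x ∈ R, x ∉ P := by
      intro x hx h
      exact (List.disjoint_of_nodup_append hnd) h (by simp [hx])
    have hau : a ∈ u := by rw [hPR]; simp
    have hcmem : ∀ x, x ∈ u → d.contains x = true := by
      intro x hx
      rw [PySem.Dict.contains_iff_mem_keys, hkeys]
      exact hx
    obtain ⟨hk, hga, hgb, hgo⟩ := pv_passB a R d haR hndR (hcmem a hau)
      (fun b hb => hcmem b (by rw [hPR]; simp [hb]))
    show (pvFill _ R).keys = u ∧ _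
    have hfilter : u.filter (fun e => e ≠ a) = P ++ R := by
      rw [hPR, List.filter_append, List.filter_cons_of_neg (by simp)]
      rw [List.filter_eq_self.2 (fun e he => by
            simp only [ne_eq, decide_eq_true_eq]
            exact fun h => haP (h ▸ he)),
          List.filter_eq_self.2 (fun e he => by
            simp only [ne_eq, decide_eq_true_eq]
            exact fun h => haR (h ▸ he))]
    apply ih (P ++ [a])
    · rw [hPR, List.append_assoc]; rfl
    · rw [hk, hkeys]
    · intro k hkmem
      rcases List.mem_append.1 hkmem with hkP | hka
      · have hka : k ≠ a := fun h => haP (h ▸ hkP)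
        rw [hgo k hka (fun h => hRP k h hkP), hP k hkP]
      · have hka : k = a := by simpa using hka
        subst hka
        rw [hga, hR k (by simp)]
        apply PySem.Dict.ext
        rw [PySem.Dict.items_foldl_insert_fresh R (fun b => b)
          (fun b => hamming k b) _ ?_ ?_]
        · dsimp only
          rw [← List.map_append, hfilter]
        · intro b hb
          rw [← Bool.not_eq_true, PySem.Dict.contains_iff_mem_keys]
          dsimp only [PySem.Dict.keys]
          simp only [List.map_map, List.mem_map, Function.comp]
          rintro ⟨x, hx, rfl⟩
          exact hRP x hb hx
        · simpa using hndR
    · intro k hkR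
      rw [hgb k hkR, hR k (by simp [hkR])]
      apply PySem.Dict.ext
      rw [PySem.Dict.items_insert_of_not_contains _ _ ?_]
      · dsimp only
        rw [List.map_append, hamming_comm a k]
        rfl
      · rw [← Bool.not_eq_true, PySem.Dict.contains_iff_mem_keys]
        dsimp only [PySem.Dict.keys]
        simp only [List.map_map, List.mem_map, Function.comp]
        rintro ⟨x, hx, rfl⟩
        exact haP hx

-- the main equality
theorem pv_main (passwords : List String) :
    assemble_database passwords = assemble_database_alt passwords := by
  have hu_nodup : (PySem.List.dedup passwords).Nodup := by
    rw [PySem.List.dedup_eq_ofList]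
    exact PySem.Set.nodup_ofList _
  have hduu : PySem.List.dedup (PySem.List.dedup passwords) = PySem.List.dedup passwords := by
    simp [PySem.List.dedup_eq_ofList, PySem.Set.ofList_ofList]
  set u := PySem.List.dedup passwords with hu_def
  have hkeys0 : (PySem.Dict.mk (u.map (fun e =>
      (e, (PySem.Dict.empty : PySem.Dict String Int))))).keys = u := by
    dsimp only [PySem.Dict.keys]
    simp [List.map_map, Function.comp_def]
  have hget0 : ∀ k ∈ u, (PySem.Dict.mk (u.map (fun e =>
      (e, (PySem.Dict.empty : PySem.Dict String Int))))).getD k PySem.Dict.empty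
      = PySem.Dict.empty := by
    intro k hk
    apply PySem.Dict.getD_of_mem_items
    · exact List.mem_map_of_mem hk
    · rw [hkeys0]; exact hu_nodup
  obtain ⟨hkA, hgA⟩ := pv_outerA passwords u
    (PySem.Dict.mk (u.map (fun e => (e, (PySem.Dict.empty : PySem.Dict String Int)))))
    hu_nodup
    (by intro k hk
        rw [PySem.Dict.contains_iff_mem_keys, hkeys0]
        exact hk)
  obtain ⟨hkB, hgB⟩ := pv_fill_spec u hu_nodup u []
    (PySem.Dict.mk (u.map (fun e => (e, (PySem.Dict.empty : PySem.Dict String Int)))))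
    (by simp) hkeys0 (by simp)
    (by intro k hk
        simpa using hget0 k hk)
  unfold assemble_database assemble_database_alt
  dsimp only
  rw [pv_db0 passwords, pv_db0 u, hduu, ← hu_def, hkeys0]
  rw [PySem.Dict.items_eq_map_keys _ (by rw [hkA, hkeys0]; exact hu_nodup) PySem.Dict.empty]
  rw [PySem.Dict.items_eq_map_keys _ (by rw [hkB]; exact hu_nodup) PySem.Dict.empty]
  rw [hkA, hkeys0, hkB]
  rw [List.map_map, List.map_map]
  apply List.map_congr_left
  intro k hk
  dsimp only [Function.comp]
  rw [hgA k, if_pos hk, hget0 k hk, pv_row_closed]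
  rw [hgB k hk]
  dsimp only
  congr 1

-- ===== VERDICT (by name: the statement is the Claim_ definition above) =====
theorem assemble_database_spec : Claim_equal_assemble_database := by
  intro passwords _ _
  unfold Spec_assemble_database
  exact pv_main passwords
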